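-- pv_equiv track=rewrite | github.com/TikiTorch21/DS-problems | Solutions/Python_Solutions/sol31.py | getWinner_a1
-- ===== SOURCE A (Python) =====
-- def getWinner_a1(l):
--     """
--     Function to find the winner
--     from an input list of ballots.
--     (APPROACH 1)
--
--     Parameters
--     ----------
--     l : list
--             input list
--
--     Returns
--     -------
--     str
--             election winner.
--     """
--     d = dict()
--     length = len(l) // 2
--
--     for name in l:
--         if name in d.keys():
--             d[name] += 1
--         else:
--             d[name] = 1
--
--     greatest = 0
--     winner = list(filter(lambda x: d[x] > length, d.keys()))
--
--     if len(winner) == 0: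
--         return "No Winner"
--
--     return winner[0]
-- ===== SOURCE B (Python) =====
-- def getWinner_a1(l):
--     """Boyer-Moore majority vote: one candidate pass + one verification pass."""
--     candidate = None
--     count = 0
--     for name in l:
--         if count == 0:
--             candidate = name
--             count = 1
--         elif name == candidate:
--             count += 1
--         else:
--             count -= 1
--     if count > 0 and sum(1 for name in l if name == candidate) > len(l) // 2:
--         return candidate
--     return "No Winner"
-- ===== Notes on version B (the rewrite author's own statement) =====
-- stated objective: faster
-- what changed: Replaces A's dictionary tally plus a filter over all distinct keys with the Boyer-Moore majority-vote algorithm: one candidate/counter pass and one verification pass, O(1) extra space instead of a dict of all candidates.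
import Mathlib
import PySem

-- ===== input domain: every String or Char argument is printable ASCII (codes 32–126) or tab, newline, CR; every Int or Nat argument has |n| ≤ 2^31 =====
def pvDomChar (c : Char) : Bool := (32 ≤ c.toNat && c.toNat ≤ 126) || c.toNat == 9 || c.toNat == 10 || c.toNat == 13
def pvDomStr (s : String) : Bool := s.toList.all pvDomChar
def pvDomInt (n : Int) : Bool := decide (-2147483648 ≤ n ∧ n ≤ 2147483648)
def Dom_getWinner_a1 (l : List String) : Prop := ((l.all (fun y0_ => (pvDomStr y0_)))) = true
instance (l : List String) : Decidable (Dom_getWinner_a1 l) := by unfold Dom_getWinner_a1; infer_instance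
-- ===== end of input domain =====

-- B replaces A's dictionary tally + filter over all keys with Boyer–Moore majority vote
-- (candidate/counter pass plus one verification pass): alternative algorithm, O(n) time, O(1) extra space.

-- ===== PORT A =====
-- A's counting-loop body: 'if name in d.keys(): d[name] += 1 else: d[name] = 1'
def aStep (d : PySem.Dict String Int) (name : String) : PySem.Dict String Int :=
  if d.contains name then d.modify name 0 (· + 1) else d.insert name 1

def getWinner_a1 (l : List String) : String :=
  let d : PySem.Dict String Int := l.foldl aStep PySem.Dict.empty
  let length : Int := PySem.Int.floordiv (l.length : Int) 2
  let winner : List String := d.keys.filter (fun x => decide (d.getD x 0 > length))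
  match winner with
  | [] => "No Winner"
  | w :: _ => w

-- ===== PORT B =====
-- Boyer–Moore step: reset when count == 0, +1 on a match, -1 otherwise.
def bmStep (s : String × Int) (name : String) : String × Int :=
  if s.2 == 0 then (name, 1)
  else if name == s.1 then (s.1, s.2 + 1)
  else (s.1, s.2 - 1)

def getWinner_a1_alt (l : List String) : String :=
  let s := l.foldl bmStep ("", 0)
  -- verification pass: sum(1 for name in l if name == candidate)
  if 0 < s.2 ∧ ((l.filter (fun name => name == s.1)).length : Int) > PySem.Int.floordiv (l.length : Int) 2
  then s.1 else "No Winner"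

-- ===== PRECONDITION & SPEC =====
def Spec_getWinner_a1 (l : List String) (out : String) : Prop := out = getWinner_a1_alt l
instance (l : List String) (out : String) : Decidable (Spec_getWinner_a1 l out) := by unfold Spec_getWinner_a1; infer_instance

-- ===== CLAIM (what is proved, stated in full; the proofs are below) =====
def Claim_equal_getWinner_a1 : Prop := ∀ (l : List String), Dom_getWinner_a1 l → Spec_getWinner_a1 l (getWinner_a1 l)

-- ===== LEMMAS AND PROOFS =====

-- A's tally dict: value at v is the count of v in the processed list.
theorem aFold_getD (l : List String) (d : PySem.Dict String Int) (v : String) :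
    (l.foldl aStep d).getD v 0 = d.getD v 0 + l.count v := by
  induction l generalizing d with
  | nil => simp
  | cons a t ih =>
    rw [List.foldl_cons, ih]
    have hst : (aStep d a).getD v 0 = d.getD v 0 + if a = v then 1 else 0 := by
      unfold aStep
      by_cases hv : v = a
      · subst hv
        rw [if_pos rfl]
        split_ifs with hc
        · rw [PySem.Dict.getD_modify, if_pos rfl]
        · rw [PySem.Dict.getD_insert, if_pos rfl,
            PySem.Dict.getD_of_not_contains d 0 (by simpa using hc)]
          ring
      · have hav : ¬ (a = v) := fun h => hv h.symm
        rw [if_neg hav]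
        split_ifs with hc
        · rw [PySem.Dict.getD_modify, if_neg hv]; ring
        · rw [PySem.Dict.getD_insert, if_neg hv]; ring
    rw [hst, List.count_cons]
    by_cases hv : a = v
    · simp [hv]; ring
    · simp [hv]

theorem aFold_mem_keys (l : List String) (d : PySem.Dict String Int) (v : String) :
    v ∈ (l.foldl aStep d).keys ↔ v ∈ l ∨ v ∈ d.keys := by
  induction l generalizing d with
  | nil => simp
  | cons a t ih =>
    rw [List.foldl_cons, ih]
    have : v ∈ (aStep d a).keys ↔ v = a ∨ v ∈ d.keys := by
      unfold aStep
      split_ifs with hc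
      · rw [PySem.Dict.keys_modify]
        exact PySem.Dict.mem_keys_insert d a v _
      · exact PySem.Dict.mem_keys_insert d a v 1
    rw [this]
    simp [List.mem_cons]
    tauto

theorem aFold_nodup_keys (l : List String) (d : PySem.Dict String Int)
    (h : d.keys.Nodup) : (l.foldl aStep d).keys.Nodup := by
  induction l generalizing d with
  | nil => exact h
  | cons a t ih =>
    rw [List.foldl_cons]
    apply ih
    unfold aStep
    split_ifs with hc
    · rw [PySem.Dict.keys_modify]
      exact PySem.Dict.nodup_keys_insert _ _ _ h
    · exact PySem.Dict.nodup_keys_insert _ _ _ h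

-- 'count > len // 2' (Python) is 'len < 2 * count'.
theorem cmp_iff (c n : Nat) :
    ((c : Int) > PySem.Int.floordiv (n : Int) 2) ↔ n < 2 * c := by
  rw [PySem.Int.floordiv_eq_ediv_of_pos (by norm_num)]
  omega

-- two distinct values cannot both be majorities
theorem count_add_le (l : List String) (v w : String) (hvw : v ≠ w) :
    l.count v + l.count w ≤ l.length := by
  induction l with
  | nil => simp
  | cons a t ih =>
    rw [List.count_cons, List.count_cons, List.length_cons]
    by_cases h1 : a = v <;> by_cases h2 : a = w <;> simp_all <;> omega

theorem filter_nodup_single {xs : List String} {p : String → Bool} {m : String}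
    (hnd : xs.Nodup) (hp : ∀ x ∈ xs, p x = true → x = m)
    (hmem : m ∈ xs) (hpm : p m = true) : xs.filter p = [m] := by
  induction xs with
  | nil => simp at hmem
  | cons a t ih =>
    rcases List.mem_cons.mp hmem with h | h
    · subst h
      rw [List.filter_cons_of_pos hpm]
      have : t.filter p = [] := by
        rw [List.filter_eq_nil_iff]
        intro x hx hpx
        have := hp x (List.mem_cons_of_mem _ hx) hpx
        subst this
        exact (List.nodup_cons.mp hnd).1 hx
      rw [this]
    · have ha : p a = false := by
        by_cases hpa : p a = true
        · have := hp a (List.mem_cons_self) hpa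
          subst this
          exact absurd h (List.nodup_cons.mp hnd).1
        · simpa using hpa
      rw [List.filter_cons_of_neg (by simp [ha])]
      exact ih (List.nodup_cons.mp hnd).2 (fun x hx => hp x (List.mem_cons_of_mem _ hx)) h

-- Boyer–Moore invariant
def BMInv (p : List String) (s : String × Int) : Prop :=
  0 ≤ s.2 ∧ 2 * (p.count s.1 : Int) ≤ p.length + s.2 ∧
    ∀ v, v ≠ s.1 → 2 * (p.count v : Int) + s.2 ≤ p.length

theorem bm_inv (l : List String) : ∀ (p : List String) (s : String × Int),
    BMInv p s → BMInv (p ++ l) (l.foldl bmStep s) := by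
  induction l with
  | nil => intro p s h; simpa using h
  | cons a t ih =>
    intro p s h
    obtain ⟨hk, hc, ho⟩ := h
    rw [List.foldl_cons]
    have key : BMInv (p ++ [a]) (bmStep s a) := by
      unfold bmStep
      have hcntv : ∀ v, ((p ++ [a]).count v : Int) =
          (p.count v : Int) + if a = v then 1 else 0 := by
        intro v
        rw [List.count_append]
        by_cases hv : a = v <;> simp [hv]
      have hlen : ((p ++ [a]).length : Int) = (p.length : Int) + 1 := by simp
      split_ifs with h0 ha
      · -- reset: count was 0
        have h0' : s.2 = 0 := by simpa using h0
        refine ⟨by norm_num, ?_, ?_⟩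
        · have := hc
          rw [hcntv, hlen]
          have hle : 2 * (p.count a : Int) ≤ p.length := by
            by_cases hva : a = s.1
            · subst hva; omega
            · have := ho a hva; omega
          simp; omega
        · intro v hvne
          rw [hcntv, hlen]
          have hle : 2 * (p.count v : Int) ≤ p.length := by
            by_cases hvs : v = s.1
            · subst hvs; omega
            · have := ho v hvs; omega
          have hva : a ≠ v := fun h => hvne (by simp [h])
          simp [hva]; omega
      · -- match: a = s.1
        have ha' : a = s.1 := by simpa using ha
        refine ⟨by omega, ?_, ?_⟩
        · rw [hcntv, hlen]; simp [ha']; omega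
        · intro v hvne
          rw [hcntv, hlen]
          have := ho v hvne
          have hav : a ≠ v := fun h => hvne (h ▸ ha')
          simp [hav]; omega
      · -- mismatch: decrement
        have ha' : a ≠ s.1 := by simpa using ha
        have h0' : s.2 ≠ 0 := by simpa using h0
        refine ⟨by omega, ?_, ?_⟩
        · rw [hcntv, hlen]
          have : a ≠ s.1 := ha'
          simp [this]; omega
        · intro v hvne
          rw [hcntv, hlen]
          have := ho v hvne
          by_cases hav : a = v <;> simp [hav] <;> omega
    have := ih (p ++ [a]) (bmStep s a) key
    simpa [List.append_assoc] using this

theorem count_filter_eq (l : List String) (c : String) :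
    (l.filter (fun name => name == c)).length = l.count c := by
  rw [List.count_eq_countP, List.countP_eq_length_filter]

-- ===== VERDICT (by name: the statement is the Claim_ definition above) =====
theorem getWinner_a1_spec : Claim_equal_getWinner_a1 := by
  intro l _
  unfold Spec_getWinner_a1 getWinner_a1 getWinner_a1_alt
  simp only []
  set d := l.foldl aStep PySem.Dict.empty with hd
  set s := l.foldl bmStep ("", 0) with hs
  have hgetD : ∀ v, d.getD v 0 = (l.count v : Int) := by
    intro v; rw [hd, aFold_getD]; simp
  have hmem : ∀ v, v ∈ d.keys ↔ v ∈ l := by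
    intro v; rw [hd, aFold_mem_keys]; simp
  have hnd : d.keys.Nodup := by
    rw [hd]; exact aFold_nodup_keys l _ (by simp)
  have hinv : BMInv l s := by
    have := bm_inv l [] ("", 0) (by refine ⟨by norm_num, ?_, ?_⟩ <;> simp)
    simpa using this
  obtain ⟨hk, hcs, hos⟩ := hinv
  have hvf : ((l.filter (fun name => name == s.1)).length : Int) = (l.count s.1 : Int) := by
    rw [count_filter_eq]
  by_cases hm : ∃ m, l.length < 2 * l.count m
  · obtain ⟨m, hmaj⟩ := hm
    have hmeml : m ∈ l := by
      have : 0 < l.count m := by omega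
      exact List.count_pos_iff.mp this
    -- B returns m
    have hms : m = s.1 := by
      by_contra hne
      have := hos m hne
      have : 2 * (l.count m : Int) ≤ l.length := by omega
      have : (l.length : Int) < 2 * (l.count m : Int) := by exact_mod_cast hmaj
      omega
    have hkpos : 0 < s.2 := by
      have h1 : (l.length : Int) < 2 * (l.count s.1 : Int) := by
        rw [← hms]; exact_mod_cast hmaj
      omega
    have hBcond : 0 < s.2 ∧ ((l.filter (fun name => name == s.1)).length : Int) >
        PySem.Int.floordiv (l.length : Int) 2 := by
      refine ⟨hkpos, ?_⟩
      rw [hvf, cmp_iff, ← hms]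
      exact hmaj
    rw [if_pos hBcond]
    -- A's winner list is exactly [m]
    have hfil : d.keys.filter (fun x => decide (d.getD x 0 > PySem.Int.floordiv (l.length : Int) 2)) = [m] := by
      apply filter_nodup_single hnd
      · intro x hx hpx
        have hmx : l.length < 2 * l.count x := by
          have := of_decide_eq_true hpx
          rw [hgetD, cmp_iff] at this
          exact this
        by_contra hne
        have h2 := count_add_le l m x (Ne.symm hne)
        omega
      · exact (hmem m).mpr hmeml
      · apply decide_eq_true
        rw [hgetD, cmp_iff]
        exact hmaj
    rw [hfil, ← hms]
  · simp only [not_exists, Nat.not_lt] at hm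
    have hBcond : ¬ (0 < s.2 ∧ ((l.filter (fun name => name == s.1)).length : Int) >
        PySem.Int.floordiv (l.length : Int) 2) := by
      rintro ⟨-, hgt⟩
      rw [hvf, cmp_iff] at hgt
      exact absurd hgt (Nat.not_lt.mpr (hm s.1)).elim
    rw [if_neg hBcond]
    have hfil : d.keys.filter (fun x => decide (d.getD x 0 > PySem.Int.floordiv (l.length : Int) 2)) = [] := by
      rw [List.filter_eq_nil_iff]
      intro x hx hpx
      have := of_decide_eq_true hpx
      rw [hgetD, cmp_iff] at this
      exact absurd this (Nat.not_lt.mpr (hm x))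
    rw [hfil]
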